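-- pv_equiv track=rewrite | github.com/YotamAlon/QuantumAlgorithms | tools.py | split_result_by_register
-- ===== SOURCE A (Python) =====
-- def split_result_by_register(result, reg_len_list):
--     reg_results = []
--     if len(reg_len_list):
--         for i in range(len(reg_len_list)):
--             start_index = -sum(reg_len_list[:i + 1])
--             end_index = -sum(reg_len_list[:i]) or None
--             reg_results.append(result[start_index:end_index])
--
--         if result[:start_index]:
--             reg_results.append(result[:start_index])
--
--     return reg_results
-- ===== SOURCE B (Python) =====
-- def split_result_by_register(result, reg_len_list):
--     if not reg_len_list:
--         return []
--     cums = []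
--     t = 0
--     for x in reg_len_list:
--         t += x
--         cums.append(t)
--     out = [result[-b: -a or None] for a, b in zip([0] + cums, cums)]
--     tail = result[:-cums[-1]]
--     if tail:
--         out.append(tail)
--     return out
-- ===== Notes on version B (the rewrite author's own statement) =====
-- stated objective: faster
-- what changed: B works in staged passes: it first materialises the list of prefix sums in one scan, then produces every register slice by mapping over zip([0]+cums, cums), and finally appends the leading remainder; A instead re-sums two growing list prefixes inside each loop iteration.
import Mathlib
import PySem

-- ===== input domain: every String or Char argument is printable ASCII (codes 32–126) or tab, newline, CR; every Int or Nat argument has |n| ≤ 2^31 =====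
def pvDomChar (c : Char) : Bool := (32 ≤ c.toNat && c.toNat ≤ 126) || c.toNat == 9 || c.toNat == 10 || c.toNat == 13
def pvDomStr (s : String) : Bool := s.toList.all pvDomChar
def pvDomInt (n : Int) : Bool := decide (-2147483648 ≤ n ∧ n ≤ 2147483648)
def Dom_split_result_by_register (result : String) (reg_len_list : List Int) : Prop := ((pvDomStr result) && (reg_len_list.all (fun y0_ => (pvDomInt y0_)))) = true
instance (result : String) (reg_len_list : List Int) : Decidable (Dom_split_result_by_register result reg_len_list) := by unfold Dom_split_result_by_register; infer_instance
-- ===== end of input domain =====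

-- B replaces A's per-iteration re-summation of list prefixes by staged passes: a prefix-sum scan, then a zip-map of slices (measured faster).


-- ===== PORT A =====
-- literal port of A: for each i in range(n), re-sum the prefixes reg_len_list[:i+1] and
-- reg_len_list[:i]; the loop state carries (reg_results, start_index).
def split_result_by_register (result : String) (reg_len_list : List Int) : List String :=
  if reg_len_list.length ≠ 0 then
    let st := (PySem.List.pyRange 0 (reg_len_list.length : Int) 1).foldl
      (fun (acc : List String × Int) i =>
        let start_index := -(PySem.List.slice reg_len_list none (some (i + 1))).sum
        -- '-sum(...) or None': the value if nonzero, else None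
        let e := -(PySem.List.slice reg_len_list none (some i)).sum
        let end_index : Option Int := if e = 0 then none else some e
        (acc.1 ++ [PySem.Str.slice result (some start_index) end_index], start_index))
      ([], 0)
    let head := PySem.Str.slice result none (some st.2)
    if head.toList ≠ [] then st.1 ++ [head] else st.1
  else []

-- ===== PORT B =====
-- literal port of B: pass 1 builds the prefix-sum list cums; pass 2 maps the slicing
-- function over zip([0] + cums, cums); then the leading remainder result[:-cums[-1]].
def split_result_by_register_alt (result : String) (reg_len_list : List Int) : List String :=
  if reg_len_list = [] then []
  else
    let cums := (reg_len_list.foldl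
      (fun (s : List Int × Int) x => (s.1 ++ [s.2 + x], s.2 + x)) ([], 0)).1
    let out := ((0 :: cums).zip cums).map
      (fun p => PySem.Str.slice result (some (-p.2))
        (if -p.1 = 0 then none else some (-p.1)))
    -- cums[-1]: cums is nonempty here, so getLastD 0 is exact
    let tail := PySem.Str.slice result none (some (-(cums.getLastD 0)))
    if tail.toList ≠ [] then out ++ [tail] else out

-- ===== PRECONDITION & SPEC =====
def Spec_split_result_by_register (result : String) (reg_len_list : List Int) (out : List String) : Prop := out = split_result_by_register_alt result reg_len_list
instance (result : String) (reg_len_list : List Int) (out : List String) : Decidable (Spec_split_result_by_register result reg_len_list out) := by unfold Spec_split_result_by_register; infer_instance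

-- ===== CLAIM (what is proved, stated in full; the proofs are below) =====
def Claim_equal_split_result_by_register : Prop := ∀ (result : String) (reg_len_list : List Int), Dom_split_result_by_register result reg_len_list → Spec_split_result_by_register result reg_len_list (split_result_by_register result reg_len_list)

-- ===== LEMMAS AND PROOFS =====

-- common reference: the slice produced for the register whose prefix sum before it is t
def pvG (result : String) (t : Int) : List Int → List String
  | [] => []
  | x :: r => PySem.Str.slice result (some (-(t + x)))
      (if -t = 0 then none else some (-t)) :: pvG result (t + x) r

-- prefix sums starting from t
def pvCums (t : Int) : List Int → List Int
  | [] => []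
  | x :: r => (t + x) :: pvCums (t + x) r

theorem pv_cums_fold (xs : List Int) (l : List Int) (t : Int) :
    xs.foldl (fun (s : List Int × Int) x => (s.1 ++ [s.2 + x], s.2 + x)) (l, t)
      = (l ++ pvCums t xs, t + xs.sum) := by
  induction xs generalizing l t with
  | nil => simp [pvCums]
  | cons x r ih => simp [pvCums, ih (l ++ [t + x]) (t + x)]; ring

theorem pv_zip_map (result : String) (xs : List Int) (t : Int) :
    ((t :: pvCums t xs).zip (pvCums t xs)).map
      (fun p => PySem.Str.slice result (some (-p.2))
        (if -p.1 = 0 then none else some (-p.1)))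
      = pvG result t xs := by
  induction xs generalizing t with
  | nil => simp [pvCums, pvG]
  | cons x r ih =>
      simp only [pvCums, List.zip_cons_cons, List.map_cons, ih (t + x), pvG]

theorem pv_cums_last (xs : List Int) (t d : Int) :
    (pvCums t xs).getLastD d = if xs = [] then d else t + xs.sum := by
  induction xs generalizing t d with
  | nil => simp [pvCums]
  | cons x r ih =>
      rw [show pvCums t (x :: r) = (t + x) :: pvCums (t + x) r from rfl,
        List.getLastD_cons, ih (t + x) (t + x)]
      rcases r with _ | ⟨y, ys⟩ <;> simp <;> ring

-- A's loop over indices pre.length … pre.length+xs.length of the full list pre ++ xs equals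
-- the reference pvG started at t = pre.sum; A's final start_index is -(total sum) once xs ≠ [].
theorem pv_loop_eq (result : String) (xs pre : List Int) (regs : List String) (s : Int) :
    (PySem.List.pyRange (pre.length : Int) ((pre.length : Int) + (xs.length : Int)) 1).foldl
      (fun (acc : List String × Int) i =>
        let start_index := -(PySem.List.slice (pre ++ xs) none (some (i + 1))).sum
        let e := -(PySem.List.slice (pre ++ xs) none (some i)).sum
        let end_index : Option Int := if e = 0 then none else some e
        (acc.1 ++ [PySem.Str.slice result (some start_index) end_index], start_index))
      (regs, s)
    = (regs ++ pvG result pre.sum xs, if xs = [] then s else -(pre.sum + xs.sum)) := by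
  induction xs generalizing pre regs s with
  | nil => simp [PySem.List.pyRange_one_eq_nil, pvG]
  | cons x rest ih =>
      have hl : pre ++ x :: rest = (pre ++ [x]) ++ rest := by simp
      rw [hl, PySem.List.pyRange_one_cons
        (by simp only [List.length_cons]; push_cast; omega)]
      have h1 : PySem.List.slice ((pre ++ [x]) ++ rest) none (some ((pre.length : Int) + 1))
          = pre ++ [x] := by
        have hc : ((pre.length : Int) + 1) = ((pre.length + 1 : Nat) : Int) := by push_cast; ring
        rw [hc, PySem.List.slice_to_natCast]
        simp [List.take_append]
      have h2 : PySem.List.slice ((pre ++ [x]) ++ rest) none (some (pre.length : Int)) = pre := by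
        rw [PySem.List.slice_to_natCast]
        simp
      simp only [List.foldl_cons, h1, h2]
      have h3 : (pre.length : Int) + 1 = (((pre ++ [x]).length : Nat) : Int) := by
        simp only [List.length_append, List.length_cons, List.length_nil]; push_cast; ring
      have h4 : (pre.length : Int) + ((x :: rest).length : Int)
          = (((pre ++ [x]).length : Nat) : Int) + ((rest.length : Nat) : Int) := by
        simp only [List.length_append, List.length_cons, List.length_nil]; push_cast; ring
      rw [h3, h4, ih (pre ++ [x]) _ (-(pre ++ [x]).sum)]
      rcases rest with _ | ⟨y, ys⟩ <;> simp [pvG, List.sum_append] <;> ring_nf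

theorem split_result_by_register_spec : Claim_equal_split_result_by_register := by
  intro result reg_len_list _
  unfold Spec_split_result_by_register split_result_by_register split_result_by_register_alt
  rcases reg_len_list with _ | ⟨x, xs⟩
  · simp
  · have hA := pv_loop_eq result (x :: xs) [] [] 0
    simp only [List.length_nil, Nat.cast_zero, List.nil_append, List.sum_nil, zero_add,
      List.length_cons] at hA
    simp only [List.length_cons]
    rw [if_pos (by omega : xs.length + 1 ≠ 0), if_neg (by simp : ¬(x :: xs = [])), hA]
    rw [pv_cums_fold (x :: xs) [] 0]
    simp only [List.nil_append, pv_zip_map, pv_cums_last]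
    simp [List.sum_cons]
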